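-- pv_equiv track=rewrite | github.com/rubenweijers/Computer-Vision-3D-Reconstruction | background.py | find_similar_rgb_values
-- ===== SOURCE A (Python) =====
-- def find_similar_rgb_values(most_common_rgb_value: tuple, threshold: int = 5) -> list:
--     """Find similar RGB values to the most common RGB value of the four cameras."""
--     similar_rgb_values = []
--     for i in range(256):
--         for j in range(256):
--             for k in range(256):
--                 if (abs(i - most_common_rgb_value[0]) < threshold and
--                     abs(j - most_common_rgb_value[1]) < threshold and
--                     abs(k - most_common_rgb_value[2]) < threshold):
--                     similar_rgb_values.append([i, j, k])
--     return similar_rgb_values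
-- ===== SOURCE B (Python) =====
-- def find_similar_rgb_values(most_common_rgb_value: tuple, threshold: int = 5) -> list:
--     """Find similar RGB values to the most common RGB value of the four cameras."""
--     def channel_range(c):
--         return range(max(0, c - threshold + 1), min(256, c + threshold))
--     similar_rgb_values = []
--     for i in channel_range(most_common_rgb_value[0]):
--         for j in channel_range(most_common_rgb_value[1]):
--             for k in channel_range(most_common_rgb_value[2]):
--                 similar_rgb_values.append([i, j, k])
--     return similar_rgb_values
-- ===== Notes on version B (the rewrite author's own statement) =====
-- stated objective: faster
-- what changed: Instead of scanning all 256^3 RGB triples and testing each channel against the threshold, B iterates only over the clamped interval [max(0,c-threshold+1), min(256,c+threshold)) around each channel, so it enumerates exactly the matching triples directly.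
import Mathlib
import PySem

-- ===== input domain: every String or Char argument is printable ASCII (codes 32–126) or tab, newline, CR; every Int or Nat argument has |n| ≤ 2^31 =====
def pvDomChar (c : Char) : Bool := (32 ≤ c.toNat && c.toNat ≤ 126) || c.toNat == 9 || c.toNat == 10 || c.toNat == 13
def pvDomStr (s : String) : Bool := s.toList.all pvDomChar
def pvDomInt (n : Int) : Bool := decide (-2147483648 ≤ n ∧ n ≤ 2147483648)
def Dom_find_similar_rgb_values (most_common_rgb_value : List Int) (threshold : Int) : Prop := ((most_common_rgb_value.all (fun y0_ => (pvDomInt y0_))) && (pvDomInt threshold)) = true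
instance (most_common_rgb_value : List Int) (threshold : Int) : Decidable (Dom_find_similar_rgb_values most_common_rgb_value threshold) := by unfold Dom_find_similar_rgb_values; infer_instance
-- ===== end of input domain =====

-- B replaces A's scan of all 256^3 RGB triples by iterating only over the clamped
-- per-channel interval around each channel value, enumerating exactly the matching triples.

-- ===== PORT A =====
def find_similar_rgb_values (most_common_rgb_value : List Int) (threshold : Int) : List (List Int) :=
  let c0 := PySem.List.pyGetD most_common_rgb_value 0 0
  let c1 := PySem.List.pyGetD most_common_rgb_value 1 0
  let c2 := PySem.List.pyGetD most_common_rgb_value 2 0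
  (PySem.List.pyRange 0 256 1).foldl (fun acc i =>
    (PySem.List.pyRange 0 256 1).foldl (fun acc j =>
      (PySem.List.pyRange 0 256 1).foldl (fun acc k =>
        if |i - c0| < threshold ∧ |j - c1| < threshold ∧ |k - c2| < threshold
        then acc ++ [[i, j, k]] else acc) acc) acc) []

-- ===== PORT B =====
-- B's helper channel_range(c) = range(max(0, c - threshold + 1), min(256, c + threshold))
def pvChannelRange (c threshold : Int) : List Int :=
  PySem.List.pyRange (max 0 (c - threshold + 1)) (min 256 (c + threshold)) 1

def find_similar_rgb_values_alt (most_common_rgb_value : List Int) (threshold : Int) : List (List Int) :=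
  (pvChannelRange (PySem.List.pyGetD most_common_rgb_value 0 0) threshold).foldl (fun acc i =>
    (pvChannelRange (PySem.List.pyGetD most_common_rgb_value 1 0) threshold).foldl (fun acc j =>
      (pvChannelRange (PySem.List.pyGetD most_common_rgb_value 2 0) threshold).foldl (fun acc k =>
        acc ++ [[i, j, k]]) acc) acc) []

-- ===== PRECONDITION & SPEC =====
-- Pre_ excludes exactly the inputs where A raises IndexError: tuples with fewer than 3
-- channels, except those short tuples where short-circuit evaluation never reaches the
-- missing channel (no i in [0,256) lies within threshold of each earlier channel).
def Pre_find_similar_rgb_values (most_common_rgb_value : List Int) (threshold : Int) : Prop :=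
  3 ≤ most_common_rgb_value.length ∨
  (most_common_rgb_value.length = 1 ∧
    ¬ (max 0 (PySem.List.pyGetD most_common_rgb_value 0 0 - threshold + 1) <
       min 256 (PySem.List.pyGetD most_common_rgb_value 0 0 + threshold))) ∨
  (most_common_rgb_value.length = 2 ∧
    ¬ ((max 0 (PySem.List.pyGetD most_common_rgb_value 0 0 - threshold + 1) <
        min 256 (PySem.List.pyGetD most_common_rgb_value 0 0 + threshold)) ∧
       (max 0 (PySem.List.pyGetD most_common_rgb_value 1 0 - threshold + 1) <
        min 256 (PySem.List.pyGetD most_common_rgb_value 1 0 + threshold))))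
instance (most_common_rgb_value : List Int) (threshold : Int) : Decidable (Pre_find_similar_rgb_values most_common_rgb_value threshold) := by unfold Pre_find_similar_rgb_values; infer_instance

def pvWitness_find_similar_rgb_values : List Int × Int := ([10, 20, 30], 2)

def Spec_find_similar_rgb_values (most_common_rgb_value : List Int) (threshold : Int) (out : List (List Int)) : Prop := out = find_similar_rgb_values_alt most_common_rgb_value threshold
instance (most_common_rgb_value : List Int) (threshold : Int) (out : List (List Int)) : Decidable (Spec_find_similar_rgb_values most_common_rgb_value threshold out) := by unfold Spec_find_similar_rgb_values; infer_instance

-- ===== CLAIM (what is proved, stated in full; the proofs are below) =====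
def Claim_equal_find_similar_rgb_values : Prop := ∀ (most_common_rgb_value : List Int) (threshold : Int), Dom_find_similar_rgb_values most_common_rgb_value threshold → Pre_find_similar_rgb_values most_common_rgb_value threshold → Spec_find_similar_rgb_values most_common_rgb_value threshold (find_similar_rgb_values most_common_rgb_value threshold)

-- ===== LEMMAS AND PROOFS =====

-- filtering a unit-step range by a half-open interval gives the clamped range
theorem pv_filter_pyRange (b lo hi : Int) : ∀ (n : Nat) (a : Int), (b - a).toNat = n →
    (PySem.List.pyRange a b 1).filter (fun x => decide (lo ≤ x ∧ x < hi)) =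
      PySem.List.pyRange (max a lo) (min b hi) 1 := by
  intro n
  induction n with
  | zero =>
    intro a ha
    rw [PySem.List.pyRange_one_eq_nil (by omega), PySem.List.pyRange_one_eq_nil (by omega)]
    rfl
  | succ m ih =>
    intro a ha
    have hab : a < b := by omega
    rw [PySem.List.pyRange_one_cons hab, List.filter_cons]
    by_cases h : lo ≤ a ∧ a < hi
    · have e1 : max a lo = a := by omega
      have e2 : max (a + 1) lo = a + 1 := by omega
      simp only [h, decide_true, and_self, if_true]
      rw [ih (a + 1) (by omega), e1, e2,
        PySem.List.pyRange_one_cons (show a < min b hi by omega)]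
    · rw [if_neg (by simp [h]), ih (a + 1) (by omega)]
      by_cases h2 : hi ≤ a
      · rw [PySem.List.pyRange_one_eq_nil (by omega), PySem.List.pyRange_one_eq_nil (by omega)]
      · have hlo : a < lo := by
          rcases Decidable.not_and_iff_or_not.mp h with h' | h' <;> omega
        have e3 : max (a + 1) lo = max a lo := by omega
        rw [e3]

-- the channel filter of A equals B's clamped channel_range
theorem pv_filter_abs (c t : Int) :
    (PySem.List.pyRange 0 256 1).filter (fun x => decide (|x - c| < t)) =
      pvChannelRange c t := by
  have h : (fun x : Int => decide (|x - c| < t)) =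
      fun x : Int => decide (c - t + 1 ≤ x ∧ x < c + t) := by
    funext x
    simp only [decide_eq_decide, abs_lt]
    omega
  rw [h, pv_filter_pyRange 256 (c - t + 1) (c + t) ((256 - 0 : Int)).toNat 0 rfl]
  rfl

theorem pv_flatMap_ite_nil {α β : Type} (l : List α) (p : α → Prop) [DecidablePred p]
    (g : α → List β) :
    l.flatMap (fun x => if p x then g x else []) = (l.filter (fun x => decide (p x))).flatMap g := by
  induction l with
  | nil => rfl
  | cons x xs ih =>
    rw [List.flatMap_cons, List.filter_cons, ih]
    by_cases h : p x
    · simp [h]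
    · simp [h]

-- a filter by a conjunction whose first two conjuncts are constant, then map
theorem pv_inner {β : Type} (R : List Int) (P Q : Prop) [Decidable P] [Decidable Q]
    (C : Int → Prop) [DecidablePred C] (f : Int → β) :
    (R.filter fun k => decide (P ∧ Q ∧ C k)).map f =
      if P ∧ Q then (R.filter fun k => decide (C k)).map f else [] := by
  by_cases hP : P <;> by_cases hQ : Q <;> simp [hP, hQ]

-- flatMap of a guarded body: the constant conjunct moves out, the varying one filters
theorem pv_mid {β : Type} (R : List Int) (P : Prop) [Decidable P]
    (Q : Int → Prop) [DecidablePred Q] (M : Int → List β) :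
    R.flatMap (fun j => if P ∧ Q j then M j else []) =
      if P then (R.filter fun j => decide (Q j)).flatMap M else [] := by
  by_cases hP : P
  · simp only [hP, true_and, if_true]
    exact pv_flatMap_ite_nil R Q M
  · simp [hP]

-- ===== VERDICT (by name: the statement is the Claim_ definition above) =====
set_option maxHeartbeats 1000000 in
theorem find_similar_rgb_values_spec : Claim_equal_find_similar_rgb_values := by
  intro mc t _ _
  unfold Spec_find_similar_rgb_values
  simp only [find_similar_rgb_values, find_similar_rgb_values_alt]
  have h1 : ∀ (i j : Int) (acc : List (List Int)),
      List.foldl (fun acc k =>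
        if |i - PySem.List.pyGetD mc 0 0| < t ∧ |j - PySem.List.pyGetD mc 1 0| < t ∧
           |k - PySem.List.pyGetD mc 2 0| < t then acc ++ [[i, j, k]] else acc) acc
        (PySem.List.pyRange 0 256 1) =
      acc ++ (if |i - PySem.List.pyGetD mc 0 0| < t ∧ |j - PySem.List.pyGetD mc 1 0| < t then
        ((PySem.List.pyRange 0 256 1).filter (fun k => decide (|k - PySem.List.pyGetD mc 2 0| < t))).map
          (fun k => [i, j, k]) else []) := by
    intro i j acc
    rw [PySem.List.foldl_append_ite
      (p := fun k => |i - PySem.List.pyGetD mc 0 0| < t ∧ |j - PySem.List.pyGetD mc 1 0| < t ∧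
        |k - PySem.List.pyGetD mc 2 0| < t)
      (f := fun k => [i, j, k]), pv_inner]
  simp only [h1]
  simp only [PySem.List.foldl_append_singleton_eq_map, PySem.List.foldl_append_eq_flatMap, List.nil_append]
  simp only [pv_mid]
  simp only [pv_flatMap_ite_nil]
  simp only [pv_filter_abs]
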